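-- pv_equiv track=rewrite | github.com/LinaC404/silly-guy-try-Leetcode | Daily attendance/2049. Count Nodes With the Highest Score.py | countHighestScoreNodes
-- ===== SOURCE A (Python) =====
-- from collections import defaultdict
--
-- def countHighestScoreNodes(parents):
--     """
--     :type parents: List[int]
--     :rtype: int
--     https://www.youtube.com/watch?v=BIBN-vYO4Gk
--     Runtime: 2177 ms, faster than 41.97% of Python3 online submissions for Count Nodes With the Highest Score.
--     Memory Usage: 117.7 MB, less than 41.67% of Python3 online submissions for Count Nodes With the Highest Score.
--     """
--     _N = len(parents)
--     children = defaultdict(list)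
--     scoredict = defaultdict(int)
--
--     for i,j in enumerate(parents):
--         children[j].append(i)
--     del children[-1]
--
--     def dfs(node):
--         sub = []
--         total = 0
--         for child in children[node]:
--             sub.append(dfs(child))
--             total += sub[-1]
--         score = 1
--         if _N-1-total!=0:
--             score = score*(_N-1-total)
--         for sub_count in sub:
--             score*=sub_count
--
--         scoredict[score]+=1
--
--         return total+1
--
--     dfs(0)
--     return max(scoredict.items(), key=lambda x: x[0])[1]
-- ===== SOURCE B (Python) =====
-- def countHighestScoreNodes(parents):
--     n = len(parents)
--     children = {}
--     for i, p in enumerate(parents):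
--         children.setdefault(p, []).append(i)
--     # iterative preorder traversal from node 0 (explicit stack instead of recursion)
--     order = []
--     stack = [0]
--     while stack:
--         v = stack.pop()
--         order.append(v)
--         stack.extend(children.get(v, [])[::-1])
--     # subtree sizes, computed bottom-up over the reversed preorder
--     size = {}
--     for v in reversed(order):
--         size[v] = 1 + sum(size[c] for c in children.get(v, []))
--     # score every visited node from the size table, tally, return count of max score
--     tally = {}
--     for v in order:
--         up = n - size[v]
--         s = up if up != 0 else 1
--         for c in children.get(v, []):
--             s *= size[c]
--         tally[s] = tally.get(s, 0) + 1
--     return tally[max(tally)]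
-- ===== Notes on version B (the rewrite author's own statement) =====
-- stated objective: alternative
-- what changed: The single recursive dfs that interleaves size computation, score computation and score tallying through shared mutable dicts is replaced by an explicit-stack iterative preorder traversal, a bottom-up size-table pass over the reversed preorder, and a separate scoring/tally pass reading that table.
import Mathlib
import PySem

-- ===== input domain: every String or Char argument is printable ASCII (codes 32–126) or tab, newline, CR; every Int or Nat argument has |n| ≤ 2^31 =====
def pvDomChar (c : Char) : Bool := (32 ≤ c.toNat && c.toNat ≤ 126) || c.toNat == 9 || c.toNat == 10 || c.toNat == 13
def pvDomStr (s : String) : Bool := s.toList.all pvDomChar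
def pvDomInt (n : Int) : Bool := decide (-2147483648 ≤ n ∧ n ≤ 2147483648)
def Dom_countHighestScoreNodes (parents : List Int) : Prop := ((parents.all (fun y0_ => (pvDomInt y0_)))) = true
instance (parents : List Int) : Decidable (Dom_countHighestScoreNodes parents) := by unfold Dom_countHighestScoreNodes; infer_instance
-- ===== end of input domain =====

-- B replaces A's single recursive dfs (which interleaves sizes, scores and the tally through shared
-- mutable dicts) by an explicit-stack preorder traversal, a bottom-up size-table pass over the
-- reversed preorder, and a separate scoring/tally pass; equivalence is proved on Pre_ (the inputs
-- where A returns: -1 occurs and node 0 is not on a parent-pointer cycle).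

-- ===== PORT A =====
-- recursive dfs of A, with a fuel parameter making the recursion structural (fuel never runs out
-- on inputs satisfying Pre_; proved below)
def dfsA (ch : PySem.Dict Int (List Int)) (N : Int) : Nat → Int → PySem.Dict Int Int → Int × PySem.Dict Int Int
  | 0, _, sd => (0, sd)
  | f+1, node, sd =>
    let st := (ch.getD node []).foldl
      (fun (acc : List Int × Int × PySem.Dict Int Int) child =>
        let r := dfsA ch N f child acc.2.2
        (acc.1 ++ [r.1], acc.2.1 + r.1, r.2))
      ([], 0, sd)
    let score := if N - 1 - st.2.1 ≠ 0 then 1 * (N - 1 - st.2.1) else 1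
    let score := st.1.foldl (fun s x => s * x) score
    (st.2.1 + 1, st.2.2.modify score 0 (· + 1))

def countHighestScoreNodes (parents : List Int) : Int :=
  let N : Int := parents.length
  let children0 := (PySem.List.enumerate parents 0).foldl
    (fun (d : PySem.Dict Int (List Int)) p => d.modify p.2 [] (· ++ [p.1])) PySem.Dict.empty
  let children := children0.erase (-1)
  let r := dfsA children N (parents.length + 1) 0 PySem.Dict.empty
  match PySem.List.max? r.2.items (fun x => x.1) with
  | some p => p.2
  | none => 0

-- ===== PORT B =====
-- the while-loop of Source B (stack kept exactly as the Python list: pop() takes the last element),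
-- with a fuel parameter; fuel n+1 suffices on Pre_ (proved below)
def bStack (ch : PySem.Dict Int (List Int)) : Nat → List Int → List Int → List Int
  | 0, _, order => order
  | f+1, stack, order =>
    match stack.getLast? with
    | none => order
    | some v => bStack ch f (stack.dropLast ++ (ch.getD v []).reverse) (order ++ [v])

def countHighestScoreNodes_alt (parents : List Int) : Int :=
  let n := parents.length
  let children := (PySem.List.enumerate parents 0).foldl
    (fun (d : PySem.Dict Int (List Int)) p => d.insert p.2 (d.getD p.2 [] ++ [p.1])) PySem.Dict.empty
  let order := bStack children (n + 1) [0] []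
  let size := order.reverse.foldl
    (fun (d : PySem.Dict Int Int) v =>
      d.insert v (1 + ((children.getD v []).map (fun c => d.getD c 0)).sum)) PySem.Dict.empty
  let tally := order.foldl
    (fun (t : PySem.Dict Int Int) v =>
      let up := (n : Int) - size.getD v 0
      let s0 := if up ≠ 0 then up else (1 : Int)
      let s := (children.getD v []).foldl (fun s c => s * size.getD c 0) s0
      t.insert s (t.getD s 0 + 1)) PySem.Dict.empty
  match PySem.List.max? tally.keys (fun x => x) with
  | some m => tally.getD m 0
  | none => 0

-- ===== PRECONDITION & SPEC =====
-- parent-pointer iteration from a node (used only to state Pre_: a closed-form reachability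
-- condition on the input, not a copy of either port's child-directed traversal)
def iterP (parents : List Int) : Nat → Int → Option Int
  | 0, x => some x
  | k+1, x =>
    if 0 ≤ x ∧ x < (parents.length : Int) then iterP parents k (PySem.List.pyGetD parents x 0)
    else none

-- Pre_: exactly the inputs on which A returns: -1 occurs (else the `del children[-1]` raises
-- KeyError) and node 0 does not lie on a cycle of parent pointers (else the recursion from 0
-- never terminates); a cycle through 0, if any, closes within len(parents) steps.
def Pre_countHighestScoreNodes (parents : List Int) : Prop :=
  (-1) ∈ parents ∧ ∀ d : Nat, d ≤ parents.length → 1 ≤ d → iterP parents d 0 ≠ some 0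

instance (parents : List Int) : Decidable (Pre_countHighestScoreNodes parents) := by
  unfold Pre_countHighestScoreNodes; infer_instance

def pvWitness_countHighestScoreNodes : List Int := [-1, 0, 0, 2]

def Spec_countHighestScoreNodes (parents : List Int) (out : Int) : Prop :=
  out = countHighestScoreNodes_alt parents
instance (parents : List Int) (out : Int) : Decidable (Spec_countHighestScoreNodes parents out) := by
  unfold Spec_countHighestScoreNodes; infer_instance

-- ===== CLAIM (what is proved, stated in full; the proofs are below) =====
def Claim_equal_countHighestScoreNodes : Prop :=
  ∀ (parents : List Int), Dom_countHighestScoreNodes parents →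
    Pre_countHighestScoreNodes parents →
    Spec_countHighestScoreNodes parents (countHighestScoreNodes parents)

-- ===== LEMMAS AND PROOFS =====

-- children of q: the indices i (in increasing order) with parents[i] = q
def chOf (P : List Int) (q : Int) : List Int :=
  ((PySem.List.enumerate P 0).filter (fun p => p.2 == q)).map (fun p => p.1)

def parOf (P : List Int) (x : Int) : Int := PySem.List.pyGetD P x 0

-- fueled subtree size / per-node score / postorder score list / preorder node list
def sizeF (P : List Int) : Nat → Int → Int
  | 0, _ => 0
  | f+1, q => 1 + ((chOf P q).map (sizeF P f)).sum

def scoreF (P : List Int) (f : Nat) (q : Int) : Int :=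
  ((chOf P q).map (sizeF P f)).foldl (fun s x => s * x)
    (if (P.length : Int) - 1 - ((chOf P q).map (sizeF P f)).sum ≠ 0 then
       1 * ((P.length : Int) - 1 - ((chOf P q).map (sizeF P f)).sum)
     else 1)

def postF (P : List Int) : Nat → Int → List Int
  | 0, _ => []
  | f+1, q => (chOf P q).flatMap (postF P f) ++ [scoreF P f q]

def preF (P : List Int) : Nat → Int → List Int
  | 0, _ => []
  | f+1, q => q :: (chOf P q).flatMap (preF P f)

-- head-form of B's stack loop (stack top at the head)
def visitH (P : List Int) : Nat → List Int → List Int → List Int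
  | 0, _, order => order
  | _+1, [], order => order
  | f+1, v :: r, order => visitH P f (chOf P v ++ r) (order ++ [v])

-- a children-path from the root 0 down to a node
inductive PathTo (P : List Int) : List Int → Int → Prop
  | root : PathTo P [] 0
  | step {l q c} : PathTo P l q → c ∈ chOf P q → PathTo P (l ++ [q]) c


theorem mem_chOf {P : List Int} {q c : Int} :
    c ∈ chOf P q ↔ 0 ≤ c ∧ c < (P.length : Int) ∧ parOf P c = q := by
  unfold chOf parOf
  simp only [List.mem_map, List.mem_filter]
  constructor
  · rintro ⟨p, ⟨hp, he⟩, rfl⟩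
    rw [PySem.List.mem_enumerate_iff] at hp
    obtain ⟨k, hk, rfl⟩ := hp
    simp only [zero_add] at *
    refine ⟨by positivity, by exact_mod_cast hk, ?_⟩
    rw [PySem.List.pyGetD_natCast, List.getD_eq_getElem _ _ hk]
    simpa using he
  · rintro ⟨h0, hlt, hpar⟩
    lift c to Nat using h0 with k
    have hk : k < P.length := by exact_mod_cast hlt
    refine ⟨((k : Int), P[k]), ⟨?_, ?_⟩, rfl⟩
    · rw [PySem.List.mem_enumerate_iff]
      exact ⟨k, hk, by simp⟩
    · rw [PySem.List.pyGetD_natCast, List.getD_eq_getElem _ _ hk] at hpar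
      simpa using hpar

theorem nodup_chOf (P : List Int) (q : Int) : (chOf P q).Nodup := by
  unfold chOf
  have h2 : ((PySem.List.enumerate P 0).filter (fun p => p.2 == q)).Pairwise (fun a b => a.1 < b.1) :=
    (PySem.List.pairwise_lt_enumerate P 0).sublist List.filter_sublist
  have h3 : (((PySem.List.enumerate P 0).filter (fun p => p.2 == q)).map (fun p => p.1)).Pairwise (· < ·) :=
    List.pairwise_map.mpr h2
  exact h3.imp ne_of_lt

theorem get?_erase_ne {κ ν : Type} [BEq κ] [LawfulBEq κ] (d : PySem.Dict κ ν) (k q : κ)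
    (h : q ≠ k) : (d.erase k).get? q = d.get? q := by
  obtain ⟨items⟩ := d
  induction items with
  | nil => rfl
  | cons p t ih =>
    simp only [PySem.Dict.erase, PySem.Dict.get?] at *
    by_cases hk : p.1 == k
    · have hnq : ¬ (p.1 == q) := by
        simp only [beq_iff_eq] at hk ⊢
        rw [hk]; exact fun hh => h hh.symm
      simp [hk, hnq]
      simpa using ih
    · by_cases hq : p.1 == q
      · simp [hk, hq]
      · simp [hk, hq]
        simpa using ih

-- both ports build the children dict the same way; its lookups at a key are chOf
theorem childrenB_getD (P : List Int) (q : Int) :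
    ((PySem.List.enumerate P 0).foldl
      (fun (d : PySem.Dict Int (List Int)) p => d.insert p.2 (d.getD p.2 [] ++ [p.1]))
      PySem.Dict.empty).getD q [] = chOf P q := by
  have hstep : (fun (d : PySem.Dict Int (List Int)) p => d.insert p.2 (d.getD p.2 [] ++ [p.1]))
      = (fun (d : PySem.Dict Int (List Int)) (p : Int × Int) => d.modify p.2 [] (· ++ [p.1])) := by
    funext d p; rfl
  have h2 : (PySem.List.enumerate P 0).foldl
      (fun (d : PySem.Dict Int (List Int)) (p : Int × Int) => d.modify p.2 [] (· ++ [p.1])) PySem.Dict.empty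
      = ((PySem.List.enumerate P 0).map (fun p => (p.2, p.1))).foldl
        (fun (d : PySem.Dict Int (List Int)) (p : Int × Int) => d.modify p.1 [] (· ++ [p.2])) PySem.Dict.empty := by
    rw [List.foldl_map]
  rw [hstep, h2, PySem.Dict.getD_foldl_modify_append]
  unfold chOf
  simp [List.filter_map, Function.comp_def]

theorem childrenA_getD (P : List Int) (q : Int) (hq : 0 ≤ q) :
    (((PySem.List.enumerate P 0).foldl
      (fun (d : PySem.Dict Int (List Int)) p => d.modify p.2 [] (· ++ [p.1]))
      PySem.Dict.empty).erase (-1)).getD q [] = chOf P q := by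
  rw [PySem.Dict.getD_eq_get?_getD, get?_erase_ne _ _ _ (by omega), ← PySem.Dict.getD_eq_get?_getD]
  have h2 : (PySem.List.enumerate P 0).foldl
      (fun (d : PySem.Dict Int (List Int)) (p : Int × Int) => d.modify p.2 [] (· ++ [p.1])) PySem.Dict.empty
      = ((PySem.List.enumerate P 0).map (fun p => (p.2, p.1))).foldl
        (fun (d : PySem.Dict Int (List Int)) (p : Int × Int) => d.modify p.1 [] (· ++ [p.2])) PySem.Dict.empty := by
    rw [List.foldl_map]
  rw [h2, PySem.Dict.getD_foldl_modify_append]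
  unfold chOf
  simp [List.filter_map, Function.comp_def]

theorem pigeon_int {l : List Int} {n : Nat} (hnd : l.Nodup)
    (hb : ∀ x ∈ l, 0 ≤ x ∧ x < (n : Int)) : l.length ≤ n := by
  have hsub : l ⊆ PySem.List.pyRange 0 n 1 := by
    intro x hx
    rw [PySem.List.mem_pyRange_one]
    exact ⟨(hb x hx).1, by simpa using (hb x hx).2⟩
  have := (List.subperm_of_subset hnd hsub).length_le
  simpa [PySem.List.length_pyRange_one] using this

theorem iterP_add (P : List Int) (a b : Nat) (x : Int) :
    iterP P (a + b) x = (iterP P a x).bind (fun y => iterP P b y) := by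
  induction a generalizing x with
  | zero => simp [iterP]
  | succ a ih =>
    have h1 : a + 1 + b = (a + b) + 1 := by omega
    rw [h1]
    simp only [iterP]
    by_cases h : 0 ≤ x ∧ x < (P.length : Int)
    · simp [h, ih]
    · simp [h]

theorem iterP_one_of_child {P : List Int} {q c : Int} (hc : c ∈ chOf P q) :
    iterP P 1 c = some q := by
  rw [mem_chOf] at hc
  obtain ⟨h0, hlt, hpar⟩ := hc
  simp [iterP, h0, hlt]
  exact hpar

theorem path_up {P : List Int} {l : List Int} {q : Int} (h : PathTo P l q) :
    ∀ x ∈ l ++ [q], ∃ k : Nat, iterP P k q = some x := by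
  induction h with
  | root => intro x hx; simp at hx; exact ⟨0, by simp [iterP, hx]⟩
  | @step l q c hp hc ih =>
    intro x hx
    rcases List.mem_append.mp hx with hx | hx
    · obtain ⟨k, hk⟩ := ih x hx
      refine ⟨1 + k, ?_⟩
      rw [iterP_add, iterP_one_of_child hc]
      simpa using hk
    · simp at hx
      exact ⟨0, by simp [iterP, hx]⟩

theorem path_downup {P : List Int} {l : List Int} {q : Int} (h : PathTo P l q) :
    iterP P (l.length) q = some 0 := by
  induction h with
  | root => simp [iterP]
  | @step l q c hp hc ih =>
    have h1 : (l ++ [q]).length = 1 + l.length := by simp; omega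
    rw [h1, iterP_add, iterP_one_of_child hc]
    simpa using ih

theorem path_head {P : List Int} {l : List Int} {q : Int} (h : PathTo P l q) :
    ∃ t, l ++ [q] = 0 :: t := by
  induction h with
  | root => exact ⟨[], rfl⟩
  | @step l q c hp hc ih =>
    obtain ⟨t, ht⟩ := ih
    exact ⟨t ++ [c], by rw [ht]; simp⟩

theorem cycle_bound {P : List Int} {d : Nat} (hd1 : 1 ≤ d) (hd : iterP P d 0 = some 0) :
    ∃ d' : Nat, 1 ≤ d' ∧ d' ≤ P.length ∧ iterP P d' 0 = some 0 := by
  classical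
  let Q : Nat → Prop := fun m => 1 ≤ m ∧ iterP P m 0 = some 0
  have hex : ∃ m, Q m := ⟨d, hd1, hd⟩
  have hQ := Nat.find_spec hex
  set d0 := Nat.find hex with hd0
  by_cases hle : d0 ≤ P.length
  · exact ⟨d0, hQ.1, hle, hQ.2⟩
  · exfalso
    -- iterates before d0 are defined and in range
    have hdef : ∀ t, t < d0 → ∃ v, iterP P t 0 = some v ∧ 0 ≤ v ∧ v < (P.length : Int) := by
      intro t ht
      have hsplit : d0 = t + (d0 - t) := by omega
      have := hQ.2
      rw [hsplit, iterP_add] at this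
      cases hv : iterP P t 0 with
      | none => rw [hv] at this; simp at this
      | some v =>
        rw [hv] at this
        simp at this
        have hst : d0 - t = (d0 - t - 1) + 1 := by omega
        rw [hst] at this
        have h1 : (d0 - t - 1) + 1 = 1 + (d0 - t - 1) := by omega
        rw [h1, iterP_add] at this
        simp only [iterP] at this
        by_cases hg : 0 ≤ v ∧ v < (P.length : Int)
        · exact ⟨v, rfl, hg⟩
        · rw [if_neg hg] at this; simp at this
    -- iterates are pairwise distinct below d0
    have hinj : ∀ a b, a < d0 → b < d0 → a < b →
        (iterP P a 0).getD 0 ≠ (iterP P b 0).getD 0 := by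
      intro a b ha hb hab heq
      obtain ⟨va, hva, _⟩ := hdef a ha
      obtain ⟨vb, hvb, _⟩ := hdef b hb
      rw [hva, hvb] at heq
      simp at heq
      -- iterP (d0 - b) vb = some 0
      have hsplit : d0 = b + (d0 - b) := by omega
      have h2 := hQ.2
      rw [hsplit, iterP_add, hvb] at h2
      simp at h2
      -- then a + (d0 - b) is a smaller cycle
      have h3 : iterP P (a + (d0 - b)) 0 = some 0 := by
        rw [iterP_add, hva]
        simp [heq, h2]
      have h4 : Q (a + (d0 - b)) := ⟨by omega, h3⟩
      have := Nat.find_le (h := hex) h4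
      omega
    have hnd : ((List.range d0).map (fun t => (iterP P t 0).getD 0)).Nodup := by
      refine (List.nodup_range).map_on ?_
      intro a ha b hb heq
      simp at ha hb
      by_contra hne
      rcases Nat.lt_or_ge a b with h | h
      · exact hinj a b ha hb h heq
      · exact hinj b a hb ha (by omega) heq.symm
    have hb : ∀ x ∈ (List.range d0).map (fun t => (iterP P t 0).getD 0),
        0 ≤ x ∧ x < (P.length : Int) := by
      intro x hx
      simp at hx
      obtain ⟨t, ht, rfl⟩ := hx
      obtain ⟨v, hv, h1, h2⟩ := hdef t ht
      rw [hv]; exact ⟨h1, h2⟩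
    have h5 := pigeon_int hnd hb
    rw [List.length_map, List.length_range] at h5
    omega

theorem path_nodup {P : List Int}
    (hcyc : ∀ d : Nat, d ≤ P.length → 1 ≤ d → iterP P d 0 ≠ some 0)
    {l : List Int} {q : Int} (h : PathTo P l q) : (l ++ [q]).Nodup := by
  induction h with
  | root => simp
  | @step l q c hp hc ih =>
    rw [show l ++ [q] ++ [c] = (l ++ [q]).concat c by simp]
    rw [List.concat_eq_append, List.nodup_append]
    refine ⟨ih, by simp, ?_⟩
    intro a ha b hb
    simp only [List.mem_singleton] at hb
    subst hb
    rintro rfl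
    have hmem := ha
    obtain ⟨k, hk⟩ := path_up hp a hmem
    have hcyc_c : iterP P (1 + k) a = some a := by
      rw [iterP_add, iterP_one_of_child hc]
      simpa using hk
    have hdown : iterP P ((l ++ [q]).length) a = some 0 := path_downup (hp.step hc)
    set m := (l ++ [q]).length
    set dd := 1 + k with hdd
    have h1 : iterP P (dd + m) a = some 0 := by
      rw [iterP_add, hcyc_c]; simpa using hdown
    have h2 : iterP P (dd + m) a = iterP P dd 0 := by
      rw [show dd + m = m + dd by omega, iterP_add, hdown]; simp
    have h3 : iterP P dd 0 = some 0 := by rw [← h2, h1]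
    obtain ⟨d', hd1, hd2, hd3⟩ := cycle_bound (by omega) h3
    exact hcyc d' hd2 hd1 hd3

theorem path_bounds {P : List Int} (hN : 0 < P.length)
    {l : List Int} {q : Int} (h : PathTo P l q) :
    ∀ x ∈ l ++ [q], 0 ≤ x ∧ x < (P.length : Int) := by
  induction h with
  | root => intro x hx; simp at hx; subst hx; constructor <;> [rfl; exact_mod_cast hN]
  | @step l q c hp hc ih =>
    intro x hx
    rcases List.mem_append.mp hx with hx | hx
    · exact ih x hx
    · simp at hx; subst hx
      have := mem_chOf.mp hc
      exact ⟨this.1, this.2.1⟩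

theorem path_len {P : List Int} (hN : 0 < P.length)
    (hcyc : ∀ d : Nat, d ≤ P.length → 1 ≤ d → iterP P d 0 ≠ some 0)
    {l : List Int} {q : Int} (h : PathTo P l q) : (l ++ [q]).length ≤ P.length :=
  pigeon_int (path_nodup hcyc h) (path_bounds hN h)

theorem path_to_zero {P : List Int}
    (hcyc : ∀ d : Nat, d ≤ P.length → 1 ≤ d → iterP P d 0 ≠ some 0)
    {l : List Int} (h : PathTo P l 0) : l = [] := by
  cases h with
  | root => rfl
  | step hp2 hc2 =>
    exfalso
    have hnd := path_nodup hcyc (hp2.step hc2)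
    obtain ⟨t, ht⟩ := path_head hp2
    rw [show ∀ (a : List Int) (c : Int), a ++ [c] = a.concat c from fun a c => by simp,
      List.concat_eq_append, List.nodup_append] at hnd
    exact hnd.2.2 0 (by rw [ht]; simp) 0 (by simp) rfl

theorem path_unique {P : List Int}
    (hcyc : ∀ d : Nat, d ≤ P.length → 1 ≤ d → iterP P d 0 ≠ some 0)
    {l1 l2 : List Int} {u : Int} (h1 : PathTo P l1 u) (h2 : PathTo P l2 u) : l1 = l2 := by
  induction h1 generalizing l2 with
  | root => exact (path_to_zero hcyc h2).symm
  | @step a p1 c hp1 hc1 ih =>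
    cases h2 with
    | root => simpa using path_to_zero hcyc (hp1.step hc1)
    | step hp2 hc2 =>
      rename_i b p2
      have hpar1 := (mem_chOf.mp hc1).2.2
      have hpar2 := (mem_chOf.mp hc2).2.2
      have hpe : p1 = p2 := by rw [← hpar1, ← hpar2]
      subst hpe
      rw [ih hp2]
theorem natsum_cast (l : List Nat) : ((l.sum : Nat) : Int) = (l.map (fun n => (n : Int))).sum := by
  induction l with
  | nil => rfl
  | cons x t ih => simp [ih]

theorem sizeF_nonneg (P : List Int) (f : Nat) (q : Int) : 0 ≤ sizeF P f q := by
  induction f generalizing q with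
  | zero => simp [sizeF]
  | succ f ih =>
    simp only [sizeF]
    have : 0 ≤ ((chOf P q).map (sizeF P f)).sum :=
      List.sum_nonneg (by intro x hx; obtain ⟨c, _, rfl⟩ := List.mem_map.mp hx; exact ih c)
    omega

theorem sizeF_eq_length (P : List Int) (f : Nat) (q : Int) :
    sizeF P f q = ((preF P f q).length : Int) := by
  induction f generalizing q with
  | zero => simp [sizeF, preF]
  | succ f ih =>
    simp only [sizeF, preF, List.length_cons, List.length_flatMap]
    rw [List.map_congr_left (fun c _ => ih c)]
    push_cast [natsum_cast, List.map_map]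
    simp [Function.comp_def]
    omega

theorem sizeF_pos (P : List Int) (f : Nat) (q : Int) : 1 ≤ sizeF P (f + 1) q := by
  simp only [sizeF]
  have : 0 ≤ ((chOf P q).map (sizeF P f)).sum :=
    List.sum_nonneg (by intro x hx; obtain ⟨c, _, rfl⟩ := List.mem_map.mp hx; exact sizeF_nonneg P f c)
  omega

theorem sizeF_stab {P : List Int} (hN : 0 < P.length)
    (hcyc : ∀ d : Nat, d ≤ P.length → 1 ≤ d → iterP P d 0 ≠ some 0)
    {l : List Int} {q : Int} (h : PathTo P l q) :
    ∀ {f g : Nat}, P.length + 1 ≤ f + (l ++ [q]).length →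
      P.length + 1 ≤ g + (l ++ [q]).length → sizeF P f q = sizeF P g q := by
  have hlen := path_len hN hcyc h
  intro f g hf hg
  induction f generalizing q l g with
  | zero => omega
  | succ f ih =>
    match g, hg with
    | 0, hg => omega
    | g+1, hg =>
      simp only [sizeF]
      congr 1
      refine congrArg _ (List.map_congr_left ?_)
      intro c hc
      have hp' : PathTo P (l ++ [q]) c := h.step hc
      have hlen' := path_len hN hcyc hp'
      exact ih hp' hlen' (by simp at hlen' hf ⊢; omega) (by simp at hlen' hg ⊢; omega)

theorem scoreF_stab {P : List Int} (hN : 0 < P.length)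
    (hcyc : ∀ d : Nat, d ≤ P.length → 1 ≤ d → iterP P d 0 ≠ some 0)
    {l : List Int} {q : Int} (h : PathTo P l q) {f g : Nat}
    (hf : P.length ≤ f + (l ++ [q]).length) (hg : P.length ≤ g + (l ++ [q]).length) :
    scoreF P f q = scoreF P g q := by
  unfold scoreF
  have hmap : (chOf P q).map (sizeF P f) = (chOf P q).map (sizeF P g) := by
    refine List.map_congr_left ?_
    intro c hc
    have hp' : PathTo P (l ++ [q]) c := h.step hc
    exact sizeF_stab hN hcyc hp' (by simp at hf ⊢; omega) (by simp at hg ⊢; omega)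
  rw [hmap]

theorem flatMap_congr_mem {α β : Type} {l : List α} {f g : α → List β}
    (h : ∀ a ∈ l, f a = g a) : l.flatMap f = l.flatMap g := by
  induction l with
  | nil => rfl
  | cons x t ih =>
    simp only [List.flatMap_cons]
    rw [h x (by simp), ih (fun a ha => h a (by simp [ha]))]

theorem postF_stab {P : List Int} (hN : 0 < P.length)
    (hcyc : ∀ d : Nat, d ≤ P.length → 1 ≤ d → iterP P d 0 ≠ some 0)
    {l : List Int} {q : Int} (h : PathTo P l q) :
    ∀ {f g : Nat}, P.length + 1 ≤ f + (l ++ [q]).length →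
      P.length + 1 ≤ g + (l ++ [q]).length → postF P f q = postF P g q := by
  have hlen := path_len hN hcyc h
  intro f g hf hg
  induction f generalizing q l g with
  | zero => omega
  | succ f ih =>
    match g, hg with
    | 0, hg => omega
    | g+1, hg =>
      simp only [postF]
      congr 1
      · refine flatMap_congr_mem ?_
        intro c hc
        have hp' : PathTo P (l ++ [q]) c := h.step hc
        have hlen' := path_len hN hcyc hp'
        exact ih hp' hlen' (by simp at hlen' hf ⊢; omega) (by simp at hlen' hg ⊢; omega)
      · rw [scoreF_stab hN hcyc h (f := f) (g := g) (by omega) (by omega)]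

theorem preF_stab {P : List Int} (hN : 0 < P.length)
    (hcyc : ∀ d : Nat, d ≤ P.length → 1 ≤ d → iterP P d 0 ≠ some 0)
    {l : List Int} {q : Int} (h : PathTo P l q) :
    ∀ {f g : Nat}, P.length + 1 ≤ f + (l ++ [q]).length →
      P.length + 1 ≤ g + (l ++ [q]).length → preF P f q = preF P g q := by
  have hlen := path_len hN hcyc h
  intro f g hf hg
  induction f generalizing q l g with
  | zero => omega
  | succ f ih =>
    match g, hg with
    | 0, hg => omega
    | g+1, hg =>
      simp only [preF]
      congr 1
      refine flatMap_congr_mem ?_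
      intro c hc
      have hp' : PathTo P (l ++ [q]) c := h.step hc
      have hlen' := path_len hN hcyc hp'
      exact ih hp' hlen' (by simp at hlen' hf ⊢; omega) (by simp at hlen' hg ⊢; omega)
-- unfolding the fueled functions at the canonical fuel P.length + 1, along a path
theorem sizeT_unfold {P : List Int} (hN : 0 < P.length)
    (hcyc : ∀ d : Nat, d ≤ P.length → 1 ≤ d → iterP P d 0 ≠ some 0)
    {l : List Int} {q : Int} (h : PathTo P l q) :
    sizeF P (P.length + 1) q = 1 + ((chOf P q).map (sizeF P (P.length + 1))).sum := by
  have hlen := path_len hN hcyc h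
  conv_lhs => rw [show P.length + 1 = P.length + 1 from rfl]
  simp only [sizeF]
  congr 1
  refine congrArg _ (List.map_congr_left ?_)
  intro c hc
  have hp' : PathTo P (l ++ [q]) c := h.step hc
  have hlen' := path_len hN hcyc hp'
  exact sizeF_stab hN hcyc hp' (f := P.length) (g := P.length + 1) (by simp at hlen' ⊢; try omega)
    (by simp at hlen' ⊢; try omega)

theorem preT_unfold {P : List Int} (hN : 0 < P.length)
    (hcyc : ∀ d : Nat, d ≤ P.length → 1 ≤ d → iterP P d 0 ≠ some 0)
    {l : List Int} {q : Int} (h : PathTo P l q) :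
    preF P (P.length + 1) q = q :: (chOf P q).flatMap (preF P (P.length + 1)) := by
  have hlen := path_len hN hcyc h
  simp only [preF]
  congr 1
  refine flatMap_congr_mem ?_
  intro c hc
  have hp' : PathTo P (l ++ [q]) c := h.step hc
  have hlen' := path_len hN hcyc hp'
  exact preF_stab hN hcyc hp' (f := P.length) (g := P.length + 1) (by simp at hlen' ⊢; try omega)
    (by simp at hlen' ⊢; try omega)

theorem postT_unfold {P : List Int} (hN : 0 < P.length)
    (hcyc : ∀ d : Nat, d ≤ P.length → 1 ≤ d → iterP P d 0 ≠ some 0)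
    {l : List Int} {q : Int} (h : PathTo P l q) :
    postF P (P.length + 1) q =
      (chOf P q).flatMap (postF P (P.length + 1)) ++ [scoreF P (P.length + 1) q] := by
  have hlen := path_len hN hcyc h
  simp only [postF]
  congr 1
  · refine flatMap_congr_mem ?_
    intro c hc
    have hp' : PathTo P (l ++ [q]) c := h.step hc
    have hlen' := path_len hN hcyc hp'
    exact postF_stab hN hcyc hp' (f := P.length) (g := P.length + 1)
      (by simp at hlen' ⊢; try omega) (by simp at hlen' ⊢; try omega)
  · exact congrArg (fun z => [z])
      (scoreF_stab hN hcyc h (f := P.length) (g := P.length + 1) (by omega) (by omega))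

-- membership in the preorder yields a path through the given one
theorem mem_preF_path {P : List Int} {f : Nat} {q u : Int} {l : List Int}
    (h : PathTo P l q) (hm : u ∈ preF P f q) :
    ∃ m s, PathTo P m u ∧ m ++ [u] = (l ++ [q]) ++ s := by
  induction f generalizing q l with
  | zero => simp [preF] at hm
  | succ f ih =>
    simp only [preF, List.mem_cons] at hm
    rcases hm with rfl | hm
    · exact ⟨l, [], h, by simp⟩
    · obtain ⟨c, hc, hm⟩ := List.mem_flatMap.mp hm
      obtain ⟨m, s, hp, he⟩ := ih (h.step hc) hm
      exact ⟨m, [c] ++ s, hp, by rw [he]; simp⟩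

theorem preF_disj {P : List Int}
    (hcyc : ∀ d : Nat, d ≤ P.length → 1 ≤ d → iterP P d 0 ≠ some 0)
    {l : List Int} {q c1 c2 u : Int} {f g : Nat} (h : PathTo P l q)
    (hc1 : c1 ∈ chOf P q) (hc2 : c2 ∈ chOf P q) (hne : c1 ≠ c2)
    (h1 : u ∈ preF P f c1) (h2 : u ∈ preF P g c2) : False := by
  obtain ⟨m1, s1, hp1, he1⟩ := mem_preF_path (h.step hc1) h1
  obtain ⟨m2, s2, hp2, he2⟩ := mem_preF_path (h.step hc2) h2
  have hm : m1 = m2 := path_unique hcyc hp1 hp2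
  rw [hm, he2] at he1
  simp only [List.append_assoc] at he1
  have h2 := List.append_cancel_left he1
  simp at h2
  exact hne h2.1.symm

theorem preF_not_self {P : List Int}
    (hcyc : ∀ d : Nat, d ≤ P.length → 1 ≤ d → iterP P d 0 ≠ some 0)
    {l : List Int} {q c : Int} {f : Nat} (h : PathTo P l q)
    (hc : c ∈ chOf P q) : q ∉ preF P f c := by
  intro hm
  obtain ⟨m, s, hp, he⟩ := mem_preF_path (h.step hc) hm
  have hm2 : m = l := path_unique hcyc hp h
  subst hm2
  have hle := congrArg List.length he
  simp at hle

theorem count_flatMap_eq {α β : Type} [BEq β] (l : List α) (g : α → List β) (u : β) :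
    (l.flatMap g).count u = (l.map (fun c => (g c).count u)).sum := by
  induction l with
  | nil => rfl
  | cons x t ih => simp [List.count_append, ih]

theorem sum_le_one_of_excl {cs : List Int} {h : Int → Nat} (hnd : cs.Nodup)
    (h1 : ∀ c ∈ cs, h c ≤ 1)
    (hx : ∀ c1 ∈ cs, ∀ c2 ∈ cs, 1 ≤ h c1 → 1 ≤ h c2 → c1 = c2) :
    (cs.map h).sum ≤ 1 := by
  induction cs with
  | nil => simp
  | cons c t ih =>
    simp only [List.map_cons, List.sum_cons]
    rcases Nat.eq_zero_or_pos (h c) with hz | hp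
    · rw [hz]
      simp only [Nat.zero_add]
      exact ih hnd.of_cons (fun a ha => h1 a (by simp [ha]))
        (fun a ha b hb => hx a (by simp [ha]) b (by simp [hb]))
    · have ht : (t.map h).sum = 0 := by
        rw [List.sum_eq_zero]
        intro x hxm
        obtain ⟨a, ha, rfl⟩ := List.mem_map.mp hxm
        by_contra hnz
        have := hx c (by simp) a (by simp [ha]) hp (by omega)
        rw [this] at hnd
        exact (List.nodup_cons.mp hnd).1 ha
      have := h1 c (by simp)
      omega

theorem count_preF_le_one {P : List Int} (hN : 0 < P.length)
    (hcyc : ∀ d : Nat, d ≤ P.length → 1 ≤ d → iterP P d 0 ≠ some 0)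
    {l : List Int} {q : Int} (h : PathTo P l q) (f : Nat) (u : Int) :
    (preF P f q).count u ≤ 1 := by
  induction f generalizing q l with
  | zero => simp [preF]
  | succ f ih =>
    simp only [preF, List.count_cons]
    rw [count_flatMap_eq]
    by_cases hu : u = q
    · subst hu
      have hz : ((chOf P u).map (fun c => (preF P f c).count u)).sum = 0 := by
        rw [List.sum_eq_zero]
        intro x hxm
        obtain ⟨c, hc, rfl⟩ := List.mem_map.mp hxm
        have hns := preF_not_self hcyc h hc (f := f)
        simp [List.count_eq_zero_of_not_mem hns]
      rw [hz]
      simp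
    · have hle : ((chOf P q).map (fun c => (preF P f c).count u)).sum ≤ 1 := by
        refine sum_le_one_of_excl (nodup_chOf P q) ?_ ?_
        · intro c hc
          exact ih (h.step hc)
        · intro c1 hc1 c2 hc2 hp1 hp2
          by_contra hne
          have hm1 : u ∈ preF P f c1 := List.count_pos_iff.mp (by omega)
          have hm2 : u ∈ preF P f c2 := List.count_pos_iff.mp (by omega)
          exact preF_disj hcyc h hc1 hc2 hne hm1 hm2
      have hifz : (if (q == u) = true then (1:Nat) else 0) = 0 := by
        simp only [beq_iff_eq, ite_eq_right_iff]
        intro hh; exact absurd hh.symm hu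
      omega

theorem mem_preF_bounds {P : List Int} (hN : 0 < P.length)
    {l : List Int} {q u : Int} {f : Nat} (h : PathTo P l q) (hm : u ∈ preF P f q) :
    0 ≤ u ∧ u < (P.length : Int) := by
  obtain ⟨m, s, hp, _⟩ := mem_preF_path h hm
  exact path_bounds hN hp u (by simp)

theorem preF_length_le {P : List Int} (hN : 0 < P.length)
    (hcyc : ∀ d : Nat, d ≤ P.length → 1 ≤ d → iterP P d 0 ≠ some 0)
    {l : List Int} {q : Int} (h : PathTo P l q) (f : Nat) :
    (preF P f q).length ≤ P.length := by
  have hnd : (preF P f q).Nodup :=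
    List.nodup_iff_count_le_one.mpr (fun u => count_preF_le_one hN hcyc h f u)
  exact pigeon_int hnd (fun x hx => mem_preF_bounds hN h hx)
def tallyL (L : List Int) (sd : PySem.Dict Int Int) : PySem.Dict Int Int :=
  L.foldl (fun d s => d.modify s 0 (· + 1)) sd

theorem tallyL_append (L1 L2 : List Int) (sd : PySem.Dict Int Int) :
    tallyL (L1 ++ L2) sd = tallyL L2 (tallyL L1 sd) := by
  simp [tallyL, List.foldl_append]

theorem dfsA_corr {P : List Int} {ch : PySem.Dict Int (List Int)}
    (hch : ∀ x : Int, 0 ≤ x → ch.getD x [] = chOf P x) :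
    ∀ (f : Nat) (q : Int), 0 ≤ q → ∀ sd,
      dfsA ch (P.length : Int) f q sd = (sizeF P f q, tallyL (postF P f q) sd) := by
  intro f
  induction f with
  | zero => intro q hq sd; simp [dfsA, sizeF, postF, tallyL]
  | succ f ih =>
    intro q hq sd
    simp only [dfsA]
    rw [hch q hq]
    have hfold : ∀ (cs : List Int), (∀ c ∈ cs, 0 ≤ c) →
        ∀ (acc : List Int × Int × PySem.Dict Int Int),
        cs.foldl (fun acc child =>
          let r := dfsA ch (P.length : Int) f child acc.2.2
          (acc.1 ++ [r.1], acc.2.1 + r.1, r.2)) acc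
        = (acc.1 ++ cs.map (sizeF P f), acc.2.1 + (cs.map (sizeF P f)).sum,
           tallyL (cs.flatMap (postF P f)) acc.2.2) := by
      intro cs hcs
      induction cs with
      | nil => intro acc; simp [tallyL]
      | cons c t iht =>
        intro acc
        simp only [List.foldl_cons]
        rw [ih c (hcs c (by simp)) acc.2.2]
        rw [iht (fun a ha => hcs a (by simp [ha]))]
        simp [tallyL_append, tallyL]
        omega
    rw [hfold (chOf P q) (fun c hc => (mem_chOf.mp hc).1) ([], 0, sd)]
    simp only [List.nil_append, Int.zero_add]
    rw [Prod.mk.injEq]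
    constructor
    · simp only [sizeF]; omega
    · rw [show postF P (f + 1) q = (chOf P q).flatMap (postF P f) ++ [scoreF P f q] from rfl]
      rw [tallyL_append]
      rfl
theorem bStack_visit {P : List Int} {ch : PySem.Dict Int (List Int)} (hN : 0 < P.length)
    (hcyc : ∀ d : Nat, d ≤ P.length → 1 ≤ d → iterP P d 0 ≠ some 0)
    (hch : ∀ x : Int, ch.getD x [] = chOf P x) :
    ∀ (f : Nat) (st ord : List Int),
      (∀ x ∈ st, ∃ l, PathTo P l x) →
      (st.map (sizeF P (P.length + 1))).sum ≤ (f : Int) →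
      bStack ch f st ord = ord ++ st.reverse.flatMap (preF P (P.length + 1)) := by
  intro f
  induction f with
  | zero =>
    intro st ord hst hf
    cases st with
    | nil => simp [bStack]
    | cons x t =>
      exfalso
      obtain ⟨l, hl⟩ := hst x (by simp)
      have h1 : 1 ≤ sizeF P (P.length + 1) x := sizeF_pos P P.length x
      have h2 : 0 ≤ (t.map (sizeF P (P.length + 1))).sum :=
        List.sum_nonneg (by intro z hz; obtain ⟨c, _, rfl⟩ := List.mem_map.mp hz
                            exact sizeF_nonneg P _ c)
      simp at hf
      omega
  | succ f ihf =>
    intro st ord hst hf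
    rcases List.eq_nil_or_concat st with rfl | ⟨st', v, rfl⟩
    · simp [bStack]
    · simp only [List.concat_eq_append] at hst hf ⊢
      have hlast : (st' ++ [v]).getLast? = some v := by simp
      have hdrop : (st' ++ [v]).dropLast = st' := by simp
      simp only [bStack, hlast, hdrop]
      obtain ⟨lv, hlv⟩ := hst v (by simp)
      have hvsz := sizeT_unfold hN hcyc hlv
      have hstep := ihf (st' ++ (ch.getD v []).reverse) (ord ++ [v]) ?_ ?_
      · rw [hstep]
        rw [hch v]
        simp only [List.reverse_append, List.reverse_reverse, List.flatMap_append,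
          List.reverse_concat]
        simp [preT_unfold hN hcyc hlv]
      · intro x hx
        rcases List.mem_append.mp hx with hx | hx
        · exact hst x (by simp [hx])
        · rw [hch v, List.mem_reverse] at hx
          exact ⟨lv ++ [v], hlv.step hx⟩
      · rw [hch v]
        simp only [List.map_append, List.sum_append, List.map_reverse, List.sum_reverse]
        have hsum : ((st' ++ [v]).map (sizeF P (P.length + 1))).sum =
            (st'.map (sizeF P (P.length + 1))).sum + sizeF P (P.length + 1) v := by
          simp
        rw [hsum] at hf
        rw [hvsz] at hf
        push_cast at hf ⊢
        omega
theorem children_closed {P : List Int} (hN : 0 < P.length)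
    (hcyc : ∀ d : Nat, d ≤ P.length → 1 ≤ d → iterP P d 0 ≠ some 0) :
    ∀ (f : Nat) {r : Int} {lr : List Int} {q c : Int}, PathTo P lr r →
      P.length + 1 ≤ f + (lr ++ [r]).length →
      q ∈ preF P f r → c ∈ chOf P q → c ∈ preF P f r := by
  intro f
  induction f with
  | zero => intro r lr q c hp hb hq hc; simp [preF] at hq
  | succ f ih =>
    intro r lr q c hp hb hq hc
    simp only [preF, List.mem_cons] at hq ⊢
    rcases hq with rfl | hq
    · -- q = r : c is a child of r, so it heads its own block
      right
      refine List.mem_flatMap.mpr ⟨c, hc, ?_⟩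
      have hp' : PathTo P (lr ++ [q]) c := hp.step hc
      have hlen' := path_len hN hcyc hp'
      have hf1 : 1 ≤ f := by simp at hlen' hb; omega
      match f, hf1 with
      | f+1, _ => simp [preF]
    · right
      obtain ⟨c'', hc'', hq⟩ := List.mem_flatMap.mp hq
      refine List.mem_flatMap.mpr ⟨c'', hc'', ?_⟩
      have hp' : PathTo P (lr ++ [r]) c'' := hp.step hc''
      have hlen' := path_len hN hcyc hp'
      exact ih hp' (by simp at hlen' hb ⊢; omega) hq hc

theorem path_mem {P : List Int} (hN : 0 < P.length)
    (hcyc : ∀ d : Nat, d ≤ P.length → 1 ≤ d → iterP P d 0 ≠ some 0)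
    {l : List Int} {q : Int} (h : PathTo P l q) : q ∈ preF P (P.length + 1) 0 := by
  induction h with
  | root => rw [preT_unfold hN hcyc PathTo.root]; simp
  | @step l q c hp hc ih =>
    exact children_closed hN hcyc (P.length + 1) PathTo.root (by simp) ih hc
def szStep (P : List Int) (d : PySem.Dict Int Int) (v : Int) : PySem.Dict Int Int :=
  d.insert v (1 + ((chOf P v).map (fun c => d.getD c 0)).sum)

theorem szd {P : List Int} (hN : 0 < P.length)
    (hcyc : ∀ d : Nat, d ≤ P.length → 1 ≤ d → iterP P d 0 ≠ some 0) :
    ∀ (f : Nat) {l : List Int} {q : Int}, PathTo P l q →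
      P.length + 1 ≤ f + (l ++ [q]).length →
      ∀ d : PySem.Dict Int Int,
      (∀ w ∈ preF P f q,
        ((preF P f q).reverse.foldl (szStep P) d).getD w 0 = sizeF P (P.length + 1) w)
      ∧ (∀ w, w ∉ preF P f q →
        ((preF P f q).reverse.foldl (szStep P) d).get? w = d.get? w) := by
  intro f
  induction f with
  | zero => intro l q hp hb d; constructor
            · intro w hw; simp [preF] at hw
            · intro w hw; simp [preF]
  | succ f ih =>
    intro l q hp hb d
    have haux : ∀ (cs : List Int), (∀ x ∈ cs, x ∈ chOf P q) → cs.Nodup →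
        ∀ d : PySem.Dict Int Int,
        (∀ w ∈ cs.flatMap (preF P f),
          ((cs.flatMap (preF P f)).reverse.foldl (szStep P) d).getD w 0 = sizeF P (P.length + 1) w)
        ∧ (∀ w, w ∉ cs.flatMap (preF P f) →
          ((cs.flatMap (preF P f)).reverse.foldl (szStep P) d).get? w = d.get? w) := by
      intro cs
      induction cs with
      | nil => intro _ _ d; constructor
               · intro w hw; simp at hw
               · intro w hw; simp
      | cons c t iht =>
        intro hsub hnd d
        have hc : c ∈ chOf P q := hsub c (by simp)
        have hpc : PathTo P (l ++ [q]) c := hp.step hc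
        have hlenc := path_len hN hcyc hpc
        have hbc : P.length + 1 ≤ f + ((l ++ [q]) ++ [c]).length := by
          simp at hb hlenc ⊢; omega
        have hih := ih hpc hbc
        have hiht := iht (fun x hx => hsub x (by simp [hx])) hnd.of_cons
        simp only [List.flatMap_cons, List.reverse_append, List.foldl_append]
        -- D1 : fold over t-blocks, then the c-block
        constructor
        · intro w hw
          rcases List.mem_append.mp hw with hw1 | hw2
          · -- w in the c-block
            exact (hih ((t.flatMap (preF P f)).reverse.foldl (szStep P) d)).1 w hw1
          · -- w in a t-block: it is not in the c-block (disjointness)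
            have hwnotc : w ∉ preF P f c := by
              intro hwc
              obtain ⟨c2, hc2, hw2'⟩ := List.mem_flatMap.mp hw2
              have hc2' : c2 ∈ chOf P q := hsub c2 (by simp [hc2])
              have hne : c ≠ c2 := by
                rintro rfl
                exact (List.nodup_cons.mp hnd).1 hc2
              exact preF_disj hcyc hp hc hc2' hne hwc hw2'
            rw [PySem.Dict.getD_eq_get?_getD,
              (hih ((t.flatMap (preF P f)).reverse.foldl (szStep P) d)).2 w hwnotc,
              ← PySem.Dict.getD_eq_get?_getD]
            exact (hiht d).1 w hw2
        · intro w hw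
          have hw1 : w ∉ preF P f c := fun hh => hw (by simp [List.mem_flatMap]; exact Or.inl hh)
          have hw2 : w ∉ t.flatMap (preF P f) := fun hh => hw (by simp; right; simpa using hh)
          rw [(hih ((t.flatMap (preF P f)).reverse.foldl (szStep P) d)).2 w hw1]
          exact (hiht d).2 w hw2
    -- assemble: process all child blocks, then the q step
    have hD := haux (chOf P q) (fun x hx => hx) (nodup_chOf P q)
    simp only [preF, List.reverse_cons, List.foldl_append, List.foldl_cons, List.foldl_nil]
    have hcval : ∀ c ∈ chOf P q,
        (((chOf P q).flatMap (preF P f)).reverse.foldl (szStep P) d).getD c 0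
          = sizeF P (P.length + 1) c := by
      intro c hc
      have hpc : PathTo P (l ++ [q]) c := hp.step hc
      have hlenc := path_len hN hcyc hpc
      have hf1 : 1 ≤ f := by simp at hb hlenc; omega
      refine (hD d).1 c (List.mem_flatMap.mpr ⟨c, hc, ?_⟩)
      match f, hf1 with
      | f+1, _ => simp [preF]
    have hval : 1 + ((chOf P q).map
        (fun c => (((chOf P q).flatMap (preF P f)).reverse.foldl (szStep P) d).getD c 0)).sum
          = sizeF P (P.length + 1) q := by
      rw [List.map_congr_left hcval]
      exact (sizeT_unfold hN hcyc hp).symm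
    constructor
    · intro w hw
      simp only [List.mem_cons] at hw
      show (szStep P (((chOf P q).flatMap (preF P f)).reverse.foldl (szStep P) d) q).getD w 0 = _
      unfold szStep
      rcases hw with rfl | hw
      · rw [PySem.Dict.getD_insert_self]
        exact hval
      · have hwq : w ≠ q := by
          rintro rfl
          obtain ⟨c2, hc2, hw2⟩ := List.mem_flatMap.mp hw
          exact preF_not_self hcyc hp hc2 hw2
        rw [PySem.Dict.getD_insert_of_ne _ _ _ hwq]
        exact (hD d).1 w hw
    · intro w hw
      simp only [List.mem_cons, not_or] at hw
      show (szStep P (((chOf P q).flatMap (preF P f)).reverse.foldl (szStep P) d) q).get? w = d.get? w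
      unfold szStep
      rw [PySem.Dict.get?_insert_of_ne _ _ hw.1]
      exact (hD d).2 w hw.2
theorem flatMap_perm_congr {α β : Type} {l : List α} {f g : α → List β}
    (h : ∀ a ∈ l, (f a).Perm (g a)) : (l.flatMap f).Perm (l.flatMap g) := by
  induction l with
  | nil => simp
  | cons x t ih =>
    simp only [List.flatMap_cons]
    exact (h x (by simp)).append (ih (fun a ha => h a (by simp [ha])))

theorem perm_post_pre {P : List Int} (hN : 0 < P.length)
    (hcyc : ∀ d : Nat, d ≤ P.length → 1 ≤ d → iterP P d 0 ≠ some 0) :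
    ∀ (f : Nat) {l : List Int} {q : Int}, PathTo P l q →
      P.length + 1 ≤ f + (l ++ [q]).length →
      (postF P f q).Perm ((preF P f q).map (scoreF P (P.length + 1))) := by
  intro f
  induction f with
  | zero =>
    intro l q hp hb
    have := path_len hN hcyc hp
    omega
  | succ f ih =>
    intro l q hp hb
    simp only [postF, preF, List.map_cons, List.map_flatMap]
    have hsc : scoreF P f q = scoreF P (P.length + 1) q := by
      refine scoreF_stab hN hcyc hp (f := f) (g := P.length + 1) ?_ (by omega)
      simp at hb ⊢; omega
    have hblocks : ((chOf P q).flatMap (postF P f)).Perm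
        ((chOf P q).flatMap (fun c => (preF P f c).map (scoreF P (P.length + 1)))) := by
      refine flatMap_perm_congr ?_
      intro c hc
      have hpc : PathTo P (l ++ [q]) c := hp.step hc
      have hlenc := path_len hN hcyc hpc
      exact ih hpc (by simp at hb hlenc ⊢; omega)
    rw [hsc]
    exact (List.perm_append_singleton _ _).trans (hblocks.cons _)

-- the two final extraction steps agree on permuted score lists
theorem endgame {L L' : List Int} (hperm : L.Perm L') (hne : L ≠ []) :
    (match PySem.List.max? (PySem.Dict.counter L).items (fun x => x.1) with
     | some p => p.2
     | none => 0) =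
    (match PySem.List.max? (PySem.Dict.counter L').keys (fun x => x) with
     | some m => (PySem.Dict.counter L').getD m 0
     | none => (0 : Int)) := by
  have hne' : L' ≠ [] := fun h => hne (List.Perm.eq_nil (h ▸ hperm))
  obtain ⟨x, hx⟩ := List.exists_mem_of_ne_nil L hne
  obtain ⟨x', hx'⟩ := List.exists_mem_of_ne_nil L' hne'
  -- A side: max over items
  have hitems : (PySem.Dict.counter L).items
      = (PySem.Set.ofList L).map (fun k => (k, (List.count k L : Int))) :=
    PySem.Dict.items_counter L
  have hitems_ne : (PySem.Dict.counter L).items ≠ [] := by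
    rw [hitems]
    intro hcon
    have := (PySem.Set.mem_ofList L x).mpr hx
    rw [List.map_eq_nil_iff.mp hcon] at this
    simp at this
  obtain ⟨p, hp⟩ : ∃ p, PySem.List.max? (PySem.Dict.counter L).items (fun x => x.1) = some p := by
    cases hmx : PySem.List.max? (PySem.Dict.counter L).items (fun x => x.1) with
    | none => exact absurd ((PySem.List.max?_eq_none_iff _ _).mp hmx) hitems_ne
    | some p => exact ⟨p, rfl⟩
  obtain ⟨m, hm⟩ : ∃ m, PySem.List.max? (PySem.Dict.counter L').keys (fun x => x) = some m := by
    cases hmx : PySem.List.max? (PySem.Dict.counter L').keys (fun x => x) with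
    | none =>
      exfalso
      have := (PySem.List.max?_eq_none_iff _ _).mp hmx
      rw [PySem.Dict.keys_counter] at this
      have hxin := (PySem.Set.mem_ofList L' x').mpr hx'
      rw [this] at hxin
      simp at hxin
    | some m => exact ⟨m, rfl⟩
  rw [hp, hm]
  -- p is (k, count k L) with k in L, k maximal
  have hpmem := PySem.List.max?_mem hp
  rw [hitems] at hpmem
  obtain ⟨k, hkS, hkp⟩ := List.mem_map.mp hpmem
  have hkL : k ∈ L := (PySem.Set.mem_ofList L k).mp hkS
  have hkmax : ∀ y ∈ L, y ≤ k := by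
    intro y hy
    have hymem : (y, (List.count y L : Int)) ∈ (PySem.Dict.counter L).items := by
      rw [hitems]
      exact List.mem_map.mpr ⟨y, (PySem.Set.mem_ofList L y).mpr hy, rfl⟩
    have := PySem.List.max?_isMax hp _ hymem
    rw [← hkp] at this
    simpa using this
  -- m is in L', maximal
  have hmmem := PySem.List.max?_mem hm
  rw [PySem.Dict.keys_counter] at hmmem
  have hmL' : m ∈ L' := (PySem.Set.mem_ofList L' m).mp hmmem
  have hmmax : ∀ y ∈ L', y ≤ m := by
    intro y hy
    have hymem : y ∈ (PySem.Dict.counter L').keys := by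
      rw [PySem.Dict.keys_counter]
      exact (PySem.Set.mem_ofList L' y).mpr hy
    exact PySem.List.max?_isMax hm _ hymem
  have hkm : k = m := le_antisymm (hmmax k (hperm.mem_iff.mp hkL)) (hkmax m (hperm.mem_iff.mpr hmL'))
  rw [← hkp]
  show ((List.count k L : Nat) : Int) = (PySem.Dict.counter L').getD m 0
  rw [PySem.Dict.getD_counter, ← hkm, hperm.count_eq]
-- ===== VERDICT (by name: the statement is the Claim_ definition above) =====
theorem countHighestScoreNodes_spec : Claim_equal_countHighestScoreNodes := by
  intro parents hdom hpre
  unfold Spec_countHighestScoreNodes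
  obtain ⟨hmem, hcyc⟩ := hpre
  have hN : 0 < parents.length := List.length_pos_of_mem hmem
  -- ===== A side =====
  unfold countHighestScoreNodes
  simp only []
  have hchA : ∀ x : Int, 0 ≤ x →
      (((PySem.List.enumerate parents 0).foldl
        (fun (d : PySem.Dict Int (List Int)) p => d.modify p.2 [] (· ++ [p.1]))
        PySem.Dict.empty).erase (-1)).getD x [] = chOf parents x :=
    fun x hx => childrenA_getD parents x hx
  rw [dfsA_corr hchA (parents.length + 1) 0 le_rfl PySem.Dict.empty]
  have htallyA : tallyL (postF parents (parents.length + 1) 0) PySem.Dict.empty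
      = PySem.Dict.counter (postF parents (parents.length + 1) 0) := by
    rw [PySem.Dict.counter_eq_foldl]; rfl
  rw [htallyA]
  -- ===== B side =====
  unfold countHighestScoreNodes_alt
  simp only []
  have hchB : ∀ x : Int,
      ((PySem.List.enumerate parents 0).foldl
        (fun (d : PySem.Dict Int (List Int)) p => d.insert p.2 (d.getD p.2 [] ++ [p.1]))
        PySem.Dict.empty).getD x [] = chOf parents x := childrenB_getD parents
  have hlenpre : ((preF parents (parents.length + 1) 0).length : Int) ≤ (parents.length : Int) := by
    exact_mod_cast preF_length_le hN hcyc PathTo.root (parents.length + 1)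
  have horder : bStack ((PySem.List.enumerate parents 0).foldl
        (fun (d : PySem.Dict Int (List Int)) p => d.insert p.2 (d.getD p.2 [] ++ [p.1]))
        PySem.Dict.empty) (parents.length + 1) [0] []
      = preF parents (parents.length + 1) 0 := by
    rw [bStack_visit hN hcyc hchB (parents.length + 1) [0] []
      (by intro x hx; simp at hx; subst hx; exact ⟨[], PathTo.root⟩)
      (by simp only [List.map_cons, List.map_nil, List.sum_cons, List.sum_nil, Int.add_zero]
          rw [sizeF_eq_length]
          push_cast at hlenpre ⊢
          omega)]
    simp
  rw [horder]
  -- size dict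
  have hszstep : (fun (d : PySem.Dict Int Int) v =>
      d.insert v (1 + ((((PySem.List.enumerate parents 0).foldl
        (fun (d : PySem.Dict Int (List Int)) p => d.insert p.2 (d.getD p.2 [] ++ [p.1]))
        PySem.Dict.empty).getD v []).map (fun c => d.getD c 0)).sum)) = szStep parents := by
    funext d v
    rw [szStep, hchB v]
  rw [hszstep]
  have hSZ := szd hN hcyc (parents.length + 1) PathTo.root (by simp) PySem.Dict.empty
  -- tally pass
  have htally : (preF parents (parents.length + 1) 0).foldl
      (fun (t : PySem.Dict Int Int) v =>
        let up := ((parents.length : Nat) : Int) -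
          ((preF parents (parents.length + 1) 0).reverse.foldl (szStep parents)
            PySem.Dict.empty).getD v 0
        let s0 := if up ≠ 0 then up else (1 : Int)
        let s := ((((PySem.List.enumerate parents 0).foldl
          (fun (d : PySem.Dict Int (List Int)) p => d.insert p.2 (d.getD p.2 [] ++ [p.1]))
          PySem.Dict.empty).getD v []).foldl (fun s c => s *
            (((preF parents (parents.length + 1) 0).reverse.foldl (szStep parents)
              PySem.Dict.empty).getD c 0)) s0)
        t.insert s (t.getD s 0 + 1)) PySem.Dict.empty
      = PySem.Dict.counter ((preF parents (parents.length + 1) 0).map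
          (scoreF parents (parents.length + 1))) := by
    rw [PySem.List.foldl_congr_mem _ _
      (fun t v => t.insert (scoreF parents (parents.length + 1) v)
        (t.getD (scoreF parents (parents.length + 1) v) 0 + 1)) _ ?_]
    · have hfm : ((preF parents (parents.length + 1) 0).map
          (scoreF parents (parents.length + 1))).foldl
          (fun (t : PySem.Dict Int Int) s => t.insert s (t.getD s 0 + 1)) PySem.Dict.empty
          = (preF parents (parents.length + 1) 0).foldl
            (fun (t : PySem.Dict Int Int) v =>
              t.insert (scoreF parents (parents.length + 1) v)
                (t.getD (scoreF parents (parents.length + 1) v) 0 + 1)) PySem.Dict.empty := by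
        rw [List.foldl_map]
      rw [← hfm]
      exact PySem.Dict.foldl_insert_getD_add_one_eq_counter _
    · intro t v hv
      obtain ⟨m, s', hpv, _⟩ := mem_preF_path PathTo.root hv
      simp only [hchB v]
      have hsv : ((preF parents (parents.length + 1) 0).reverse.foldl (szStep parents)
          PySem.Dict.empty).getD v 0 = sizeF parents (parents.length + 1) v := hSZ.1 v hv
      have hin : ∀ c ∈ chOf parents v,
          ((preF parents (parents.length + 1) 0).reverse.foldl (szStep parents)
            PySem.Dict.empty).getD c 0 = sizeF parents (parents.length + 1) c := by
        intro c hc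
        exact hSZ.1 c (path_mem hN hcyc (hpv.step hc))
      have hfold2 : (chOf parents v).foldl (fun s c => s *
          (((preF parents (parents.length + 1) 0).reverse.foldl (szStep parents)
            PySem.Dict.empty).getD c 0))
          (if ((parents.length : Nat) : Int) - sizeF parents (parents.length + 1) v ≠ 0 then
            ((parents.length : Nat) : Int) - sizeF parents (parents.length + 1) v else 1)
          = scoreF parents (parents.length + 1) v := by
        rw [PySem.List.foldl_congr_mem _ _
          (fun s c => s * sizeF parents (parents.length + 1) c) _
          (fun acc c hc => by rw [hin c hc])]
        have hfm2 : ∀ I : Int, ((chOf parents v).map (sizeF parents (parents.length + 1))).foldl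
            (fun (s x : Int) => s * x) I
            = (chOf parents v).foldl
              (fun (s : Int) c => s * sizeF parents (parents.length + 1) c) I := by
          intro I; rw [List.foldl_map]
        rw [← hfm2]
        unfold scoreF
        have hup : ((parents.length : Nat) : Int) - sizeF parents (parents.length + 1) v
            = (parents.length : Int) - 1 -
              ((chOf parents v).map (sizeF parents (parents.length + 1))).sum := by
          rw [sizeT_unfold hN hcyc hpv]
          ring
        rw [hup]
        congr 1
        split_ifs with h
        · ring
        · rfl
      simp only [hsv, hfold2]
  rw [htally]
  -- ===== combine =====
  have hperm := perm_post_pre hN hcyc (parents.length + 1) PathTo.root (by simp)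
  have hpostne : postF parents (parents.length + 1) 0 ≠ [] := by
    rw [postT_unfold hN hcyc PathTo.root]
    simp
  exact endgame hperm hpostne
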